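-- pv_equiv track=rewrite | github.com/jasminapegan/antonym_detection | classification/model.py | expand_classes_for_bert
-- ===== SOURCE A (Python) =====
-- def expand_classes_for_bert(sent, sent_classes):
--     new_sent_classes = []
--     curr_cls_index = -1
--     for i in range(len(sent)):
--         if sent[i][0] != '#':
--             curr_cls_index += 1
--             new_sent_classes.append(sent_classes[curr_cls_index])
--
--         else:
--             new_sent_classes.append(sent_classes[curr_cls_index])
--     return new_sent_classes
-- ===== SOURCE B (Python) =====
-- def expand_classes_for_bert(sent, sent_classes):
--     # build a word-start flag per token, then a prefix-count table,
--     # then map each token's running count to its class via a comprehension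
--     flags = [0 if tok[0] == '#' else 1 for tok in sent]
--     counts = []
--     total = 0
--     for f in flags:
--         total += f
--         counts.append(total)
--     return [sent_classes[c - 1] for c in counts]
-- ===== Notes on version B (the rewrite author's own statement) =====
-- stated objective: alternative
-- what changed: Replaces the single fused loop with a running class counter by a three-stage pipeline: per-token word-start flags, a prefix-count table, and a comprehension indexing sent_classes by count-1 (the leading-'#' case becoming Python's natural -1 index).
import Mathlib
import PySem

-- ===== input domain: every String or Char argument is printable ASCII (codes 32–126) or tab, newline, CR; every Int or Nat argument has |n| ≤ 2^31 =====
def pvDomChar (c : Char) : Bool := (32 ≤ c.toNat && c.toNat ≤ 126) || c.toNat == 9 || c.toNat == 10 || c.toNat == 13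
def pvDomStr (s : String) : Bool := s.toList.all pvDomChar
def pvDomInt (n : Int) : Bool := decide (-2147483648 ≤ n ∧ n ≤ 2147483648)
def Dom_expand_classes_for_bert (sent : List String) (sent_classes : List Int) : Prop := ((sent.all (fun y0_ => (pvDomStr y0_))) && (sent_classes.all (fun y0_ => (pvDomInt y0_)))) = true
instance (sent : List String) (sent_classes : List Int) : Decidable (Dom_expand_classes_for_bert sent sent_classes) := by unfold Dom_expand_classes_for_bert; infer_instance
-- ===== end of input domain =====

-- ===== PORT A =====
-- B restructures A into flags / prefix-count / mapping passes; same values everywhere on Pre_.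
-- Out-of-range class indexing (only reachable outside Pre_, where Python raises) is ported with .getD 0.
def pvAGo (scs : List Int) : List String → Int → List Int
  | [], _ => []
  | t :: rest, curr =>
    if PySem.Str.pyGet? t 0 ≠ some '#' then
      (PySem.List.pyGet? scs (curr + 1)).getD 0 :: pvAGo scs rest (curr + 1)
    else
      (PySem.List.pyGet? scs curr).getD 0 :: pvAGo scs rest curr

def expand_classes_for_bert (sent : List String) (sent_classes : List Int) : List Int :=
  pvAGo sent_classes sent (-1)

-- ===== PORT B =====
def pvFlags (sent : List String) : List Int :=
  sent.map (fun tok => if PySem.Str.pyGet? tok 0 = some '#' then 0 else 1)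

def pvCounts : List Int → Int → List Int
  | [], _ => []
  | f :: rest, total => (total + f) :: pvCounts rest (total + f)

def expand_classes_for_bert_alt (sent : List String) (sent_classes : List Int) : List Int :=
  (pvCounts (pvFlags sent) 0).map (fun c => (PySem.List.pyGet? sent_classes (c - 1)).getD 0)

-- ===== PRECONDITION & SPEC =====
-- Pre_ excludes exactly the inputs where Python A raises IndexError: an empty token (tok[0]),
-- a nonempty sent with empty sent_classes (the -1 or 0 access), or more word-starting tokens
-- than classes.
def Pre_expand_classes_for_bert (sent : List String) (sent_classes : List Int) : Prop :=
  (∀ t ∈ sent, t ≠ "") ∧ (sent = [] ∨ sent_classes ≠ []) ∧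
  ((sent.filter (fun t => PySem.Str.pyGet? t 0 ≠ some '#')).length ≤ sent_classes.length)

instance (sent : List String) (sent_classes : List Int) : Decidable (Pre_expand_classes_for_bert sent sent_classes) := by
  unfold Pre_expand_classes_for_bert; infer_instance

def pvWitness_expand_classes_for_bert : List String × List Int :=
  (["he", "##llo", "world"], [5, 7])

def Spec_expand_classes_for_bert (sent : List String) (sent_classes : List Int) (out : List Int) : Prop := out = expand_classes_for_bert_alt sent sent_classes
instance (sent : List String) (sent_classes : List Int) (out : List Int) : Decidable (Spec_expand_classes_for_bert sent sent_classes out) := by unfold Spec_expand_classes_for_bert; infer_instance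

-- ===== CLAIM (what is proved, stated in full; the proofs are below) =====
def Claim_equal_expand_classes_for_bert : Prop := ∀ (sent : List String) (sent_classes : List Int), Dom_expand_classes_for_bert sent sent_classes → Pre_expand_classes_for_bert sent sent_classes → Spec_expand_classes_for_bert sent sent_classes (expand_classes_for_bert sent sent_classes)

-- ===== LEMMAS AND PROOFS =====

-- loop invariant: A's remaining loop from class index `curr` equals B's mapped
-- prefix-count pass started at total = curr + 1
theorem pvAGo_eq_counts (scs : List Int) (sent : List String) (curr : Int) :
    pvAGo scs sent curr
      = (pvCounts (pvFlags sent) (curr + 1)).map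
          (fun c => (PySem.List.pyGet? scs (c - 1)).getD 0) := by
  induction sent generalizing curr with
  | nil => simp [pvAGo, pvFlags, pvCounts]
  | cons t rest ih =>
    simp only [pvFlags, PySem.Str.pyGet?] at ih ⊢
    simp only [pvAGo, pvCounts, PySem.Str.pyGet?, List.map_cons, ne_eq]
    split_ifs with h
    · -- continuation token '#' (flag 0)
      rw [ih curr]
      norm_num
    · -- word-starting token (flag 1)
      rw [ih (curr + 1)]
      norm_num

-- ===== VERDICT (by name: the statement is the Claim_ definition above) =====
theorem expand_classes_for_bert_spec : Claim_equal_expand_classes_for_bert := by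
  intro sent sent_classes _ _
  unfold Spec_expand_classes_for_bert expand_classes_for_bert expand_classes_for_bert_alt
  have := pvAGo_eq_counts sent_classes sent (-1)
  simpa using this
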